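-- pv_equiv track=rewrite | github.com/cacer019/CSCI_1133 | HW6/HW6.py | sameKeys
-- ===== SOURCE A (Python) =====
-- def sameKeys(diction1, diction2):
--
--     dic_return = {}
--
--     if diction1 == {} or diction2 == {}:
--
--         return {}
--
--     else:
--
--         for x in diction1:
--
--             if x in diction2:
--
--                 dic_return[x] = [diction1[x], diction2[x]]
--
--     return dic_return
-- ===== SOURCE B (Python) =====
-- def sameKeys(diction1, diction2):
--     merged = {}
--     for k, v in list(diction1.items()) + list(diction2.items()):
--         merged.setdefault(k, []).append(v)
--     return {k: vs for k, vs in merged.items() if len(vs) == 2}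
-- ===== Notes on version B (the rewrite author's own statement) =====
-- stated objective: alternative
-- what changed: Instead of scanning diction1 with a membership test against diction2, B concatenates both dicts' item lists, groups the values by key with setdefault into one merged dict, and keeps exactly the groups of size 2 (a key group has two values iff the key appears in both dicts, and in order [v1, v2]).
import Mathlib
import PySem

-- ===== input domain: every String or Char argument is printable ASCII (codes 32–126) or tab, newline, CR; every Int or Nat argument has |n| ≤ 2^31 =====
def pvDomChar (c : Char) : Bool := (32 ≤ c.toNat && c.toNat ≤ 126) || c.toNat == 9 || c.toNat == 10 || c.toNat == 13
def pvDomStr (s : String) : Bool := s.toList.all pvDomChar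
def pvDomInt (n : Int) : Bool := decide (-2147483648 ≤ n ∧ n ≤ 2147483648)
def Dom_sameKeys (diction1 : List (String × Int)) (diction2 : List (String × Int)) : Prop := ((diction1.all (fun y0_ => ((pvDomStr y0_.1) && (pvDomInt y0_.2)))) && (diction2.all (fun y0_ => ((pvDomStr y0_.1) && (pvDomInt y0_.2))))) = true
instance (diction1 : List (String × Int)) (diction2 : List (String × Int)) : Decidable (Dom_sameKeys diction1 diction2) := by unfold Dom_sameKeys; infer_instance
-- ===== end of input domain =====

-- B replaces A's guarded scan-with-membership-test by a grouping pass: concatenate both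
-- dicts' item lists, group the values by key, and keep exactly the groups of size 2
-- (alternative algorithm; same cost).

-- ===== PORT A =====
-- if diction1 == {} or diction2 == {}: return {}
-- for x in diction1: if x in diction2: dic_return[x] = [diction1[x], diction2[x]]
def sameKeys (diction1 : List (String × Int)) (diction2 : List (String × Int)) : List (String × List Int) :=
  if diction1.isEmpty || diction2.isEmpty then []
  else
    (diction1.foldl
      (fun (acc : PySem.Dict String (List Int)) p =>
        if (PySem.Dict.mk diction2).contains p.1 then
          acc.insert p.1 [(PySem.Dict.mk diction1).getD p.1 0, (PySem.Dict.mk diction2).getD p.1 0]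
        else acc)
      PySem.Dict.empty).items

-- ===== PORT B =====
-- merged = {}; for k, v in list(diction1.items()) + list(diction2.items()):
--   merged.setdefault(k, []).append(v)
-- return {k: vs for k, vs in merged.items() if len(vs) == 2}
def sameKeys_alt (diction1 : List (String × Int)) (diction2 : List (String × Int)) : List (String × List Int) :=
  let merged : PySem.Dict String (List Int) :=
    ((PySem.Dict.mk diction1).items ++ (PySem.Dict.mk diction2).items).foldl
      (fun m p => m.modify p.1 [] (fun vs => vs ++ [p.2])) PySem.Dict.empty
  merged.items.filter (fun p => p.2.length == 2)

-- ===== PRECONDITION & SPEC =====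
-- The dict-typed arguments are modelled as association lists; Pre_ restricts to lists with
-- DISTINCT keys — exactly the lists that represent a Python dict (the Python function can
-- never receive duplicate keys, so nothing A returns on is excluded).
def Pre_sameKeys (diction1 : List (String × Int)) (diction2 : List (String × Int)) : Prop :=
  (diction1.map Prod.fst).Nodup ∧ (diction2.map Prod.fst).Nodup
instance (diction1 : List (String × Int)) (diction2 : List (String × Int)) : Decidable (Pre_sameKeys diction1 diction2) := by unfold Pre_sameKeys; infer_instance

def pvWitness_sameKeys : (List (String × Int)) × (List (String × Int)) :=
  ([("a", 1), ("c", 4)], [("a", 2), ("b", 3)])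

def Spec_sameKeys (diction1 : List (String × Int)) (diction2 : List (String × Int)) (out : List (String × List Int)) : Prop := out = sameKeys_alt diction1 diction2
instance (diction1 : List (String × Int)) (diction2 : List (String × Int)) (out : List (String × List Int)) : Decidable (Spec_sameKeys diction1 diction2 out) := by unfold Spec_sameKeys; infer_instance

-- ===== CLAIM (what is proved, stated in full; the proofs are below) =====
def Claim_equal_sameKeys : Prop := ∀ (diction1 : List (String × Int)) (diction2 : List (String × Int)), Dom_sameKeys diction1 diction2 → Pre_sameKeys diction1 diction2 → Spec_sameKeys diction1 diction2 (sameKeys diction1 diction2)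

-- ===== LEMMAS AND PROOFS =====

-- the value stored at a shared key k (depends only on k and the two input dicts)
def pvVal (diction1 : List (String × Int)) (diction2 : List (String × Int)) (k : String) : List Int :=
  [(PySem.Dict.mk diction1).getD k 0, (PySem.Dict.mk diction2).getD k 0]

-- dedup of a cons: the head, then the dedup of the tail without the head
lemma pv_dedup_cons {α : Type} [BEq α] [LawfulBEq α] (x : α) (xs : List α) :
    PySem.List.dedup (x :: xs) = x :: (PySem.List.dedup xs).filter (fun y => !(y == x)) := by
  rw [show (x :: xs) = [x] ++ xs from rfl]
  unfold PySem.List.dedup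
  rw [PySem.Set.ofList_append, PySem.Set.update_eq_append_filter]
  rw [show PySem.Set.ofList [x] = [x] from rfl]
  show x :: _ = x :: _
  congr 1
  apply List.filter_congr
  intro y _
  rw [PySem.Set.contains_eq_listContains]
  simp only [List.contains_cons, List.contains_nil, Bool.or_false]

-- a filter by P absorbs a preceding "≠ x" filter when P x is false
lemma pv_filter_absorb (P : String → Bool) (x : String) (l : List String) (hx : P x = false) :
    (l.filter (fun y => !(y == x))).filter P = l.filter P := by
  rw [List.filter_filter]
  apply List.filter_congr
  intro a _
  by_cases h : a = x
  · subst h; simp [hx]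
  · simp [h]

-- loop invariant for A's fold: with every stored value already canonical and keys distinct,
-- the fold appends exactly the fresh shared keys of l, in dedup order, with canonical values
lemma pv_fold_items (diction1 diction2 : List (String × Int)) (l : List (String × Int))
    (acc : PySem.Dict String (List Int))
    (hnd : acc.keys.Nodup)
    (hval : ∀ p ∈ acc.items, p.2 = pvVal diction1 diction2 p.1) :
    (l.foldl
      (fun (acc : PySem.Dict String (List Int)) p =>
        if (PySem.Dict.mk diction2).contains p.1 then
          acc.insert p.1 (pvVal diction1 diction2 p.1)
        else acc) acc).items
    = acc.items ++
      ((PySem.List.dedup (l.map Prod.fst)).filter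
        (fun k => (PySem.Dict.mk diction2).contains k && !acc.contains k)).map
        (fun k => (k, pvVal diction1 diction2 k)) := by
  induction l generalizing acc with
  | nil =>
    simp only [List.foldl_nil, List.map_nil]
    rw [show PySem.List.dedup ([] : List String) = [] from rfl]
    simp
  | cons p l ih =>
    simp only [List.foldl_cons, List.map_cons, pv_dedup_cons, List.filter_cons]
    by_cases hc : (PySem.Dict.mk diction2).contains p.1 = true
    · rw [if_pos hc]
      by_cases hm : acc.contains p.1 = true
      · -- overwrite of an already-canonical entry: the dict is unchanged
        have hid : (acc.insert p.1 (pvVal diction1 diction2 p.1)) = acc := by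
          apply PySem.Dict.ext
          rw [PySem.Dict.items_insert_of_contains acc _ hm]
          have heach : List.map (fun (q : String × List Int) =>
              if (q.1 == p.1) = true then (p.1, pvVal diction1 diction2 p.1) else q) acc.items
              = List.map id acc.items := by
            apply List.map_congr_left
            intro q hq
            by_cases he : (q.1 == p.1) = true
            · have hq1 : q.1 = p.1 := by simpa using he
              rw [if_pos he, ← hq1, ← hval q hq]
              rfl
            · simp [he]
          rw [heach, List.map_id]
        have hP : ((PySem.Dict.mk diction2).contains p.1 && !acc.contains p.1) = false := by
          rw [hm]; simp
        rw [hid, ih acc hnd hval, hP]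
        simp only [Bool.false_eq_true, if_false]
        rw [pv_filter_absorb _ p.1 _ hP]
      · -- fresh key: the entry is appended at the end
        have hm' : acc.contains p.1 = false := by
          revert hm; cases acc.contains p.1 <;> simp
        have hitems : (acc.insert p.1 (pvVal diction1 diction2 p.1)).items
            = acc.items ++ [(p.1, pvVal diction1 diction2 p.1)] :=
          PySem.Dict.items_insert_of_not_contains acc _ hm'
        have hnd' : (acc.insert p.1 (pvVal diction1 diction2 p.1)).keys.Nodup :=
          PySem.Dict.nodup_keys_insert acc _ _ hnd
        have hval' : ∀ q ∈ (acc.insert p.1 (pvVal diction1 diction2 p.1)).items,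
            q.2 = pvVal diction1 diction2 q.1 := by
          intro q hq
          rw [hitems] at hq
          rcases List.mem_append.mp hq with h1 | h1
          · exact hval q h1
          · simp only [List.mem_singleton] at h1; subst h1; rfl
        have hP : ((PySem.Dict.mk diction2).contains p.1 && !acc.contains p.1) = true := by
          rw [hc, hm']; rfl
        rw [ih _ hnd' hval', hitems, if_pos hP]
        have hfil : (PySem.List.dedup (l.map Prod.fst)).filter
              (fun k => (PySem.Dict.mk diction2).contains k
                && !(acc.insert p.1 (pvVal diction1 diction2 p.1)).contains k)
            = ((PySem.List.dedup (l.map Prod.fst)).filter (fun y => !(y == p.1))).filter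
              (fun k => (PySem.Dict.mk diction2).contains k && !acc.contains k) := by
          rw [List.filter_filter]
          apply List.filter_congr
          intro a _
          rw [PySem.Dict.contains_insert]
          by_cases ha : a = p.1
          · subst ha; simp
          · have hb : (a == p.1) = false := by simp [ha]
            cases hda : (diction2.any fun q => q.1 == a) <;>
              cases hca : acc.contains a <;> simp [hb, hda]
        rw [hfil]
        simp [List.append_assoc]
    · -- key not shared: nothing happens, and the key is filtered out on both sides
      have hc' : (PySem.Dict.mk diction2).contains p.1 = false := by
        revert hc; cases (PySem.Dict.mk diction2).contains p.1 <;> simp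
      have hP : ((PySem.Dict.mk diction2).contains p.1 && !acc.contains p.1) = false := by
        rw [hc']; rfl
      rw [if_neg hc, ih acc hnd hval, hP]
      simp only [Bool.false_eq_true, if_false]
      rw [pv_filter_absorb _ p.1 _ hP]

-- the values of l grouped at key k: one value (the lookup) if k is a key of l, none otherwise
lemma pv_filter_key (l : List (String × Int)) (k : String) (h : (l.map Prod.fst).Nodup) :
    (l.filter (fun p => p.1 == k)).map (fun p => p.2)
    = if (PySem.Dict.mk l).contains k then [(PySem.Dict.mk l).getD k 0] else [] := by
  induction l with
  | nil => simp [PySem.Dict.contains_mk]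
  | cons a t ih =>
    simp only [List.map_cons, List.nodup_cons] at h
    obtain ⟨hna, hnt⟩ := h
    rw [List.filter_cons]
    by_cases he : a.1 = k
    · have heq : (a.1 == k) = true := by simp [he]
      have hct : (PySem.Dict.mk t).contains k = false := by
        rw [PySem.Dict.contains_mk]
        simp only [List.any_eq_false, beq_iff_eq]
        intro q hq hqk
        apply hna; rw [he, ← hqk]; exact List.mem_map.mpr ⟨q, hq, rfl⟩
      have hft : t.filter (fun p => p.1 == k) = [] := by
        rw [List.filter_eq_nil_iff]
        intro q hq
        simp only [beq_iff_eq]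
        intro hqk
        apply hna; rw [he, ← hqk]; exact List.mem_map.mpr ⟨q, hq, rfl⟩
      have hc : (PySem.Dict.mk (a :: t)).contains k = true := by
        rw [PySem.Dict.contains_mk]; exact List.any_eq_true.mpr ⟨a, List.mem_cons_self, heq⟩
      rw [heq, hft, hc]
      simp only [if_true, List.map_cons, List.map_nil]
      congr 1
      rw [PySem.Dict.getD_eq_get?_getD,
        show (PySem.Dict.mk (a :: t)) = (PySem.Dict.mk ((a.1, a.2) :: t)) from rfl,
        PySem.Dict.get?_mk_cons, heq]
      simp
    · have heq : (a.1 == k) = false := by simp [he]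
      rw [heq]
      simp only [Bool.false_eq_true, if_false]
      rw [ih hnt]
      have hc : (PySem.Dict.mk (a :: t)).contains k = (PySem.Dict.mk t).contains k := by
        rw [PySem.Dict.contains_mk, PySem.Dict.contains_mk, List.any_cons, heq, Bool.false_or]
      have hg : (PySem.Dict.mk (a :: t)).getD k 0 = (PySem.Dict.mk t).getD k 0 := by
        rw [PySem.Dict.getD_eq_get?_getD, PySem.Dict.getD_eq_get?_getD,
          show (PySem.Dict.mk (a :: t)) = (PySem.Dict.mk ((a.1, a.2) :: t)) from rfl,
          PySem.Dict.get?_mk_cons, heq]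
        simp
      rw [hc, hg]

-- membership in a dict's key list decides contains
lemma pv_contains_of_mem (l : List (String × Int)) (k : String) (h : k ∈ l.map Prod.fst) :
    (PySem.Dict.mk l).contains k = true := by
  rw [PySem.Dict.contains_mk]
  obtain ⟨q, hq, hk⟩ := List.mem_map.mp h
  exact List.any_eq_true.mpr ⟨q, hq, by simp [hk]⟩

lemma pv_not_contains_of_not_mem (l : List (String × Int)) (k : String)
    (h : ¬ k ∈ l.map Prod.fst) : (PySem.Dict.mk l).contains k = false := by
  rw [PySem.Dict.contains_mk]
  simp only [List.any_eq_false, beq_iff_eq]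
  intro q hq hqk
  exact h (hqk ▸ List.mem_map.mpr ⟨q, hq, rfl⟩)

-- characterisation of B: the shared keys of diction1 in order, with their value pair
lemma pv_B_eq (d1 d2 : List (String × Int))
    (h1 : (d1.map Prod.fst).Nodup) (h2 : (d2.map Prod.fst).Nodup) :
    sameKeys_alt d1 d2
    = ((d1.map Prod.fst).filter (fun k => (PySem.Dict.mk d2).contains k)).map
        (fun k => (k, pvVal d1 d2 k)) := by
  unfold sameKeys_alt
  show (((d1 ++ d2).foldl (fun m p => m.modify p.1 [] (fun vs => vs ++ [p.2]))
      PySem.Dict.empty).items).filter (fun p => p.2.length == 2) = _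
  set L : List (String × Int) := d1 ++ d2 with hL
  set merged : PySem.Dict String (List Int) :=
    L.foldl (fun m p => m.modify p.1 [] (fun vs => vs ++ [p.2])) PySem.Dict.empty with hm
  have hnd : merged.keys.Nodup := by
    rw [hm]
    exact PySem.Dict.nodup_keys_foldl_modify_key L Prod.fst [] (fun _ p vs => vs ++ [p.2])
      PySem.Dict.empty PySem.Dict.nodup_keys_empty
  have hkeys : merged.keys = (d1.map Prod.fst)
      ++ (d2.map Prod.fst).filter (fun y => !(PySem.Set.ofList (d1.map Prod.fst)).contains y) := by
    rw [hm, PySem.Dict.keys_foldl_modify_key L Prod.fst [] (fun _ p vs => vs ++ [p.2])]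
    rw [show (PySem.Dict.empty : PySem.Dict String (List Int)).keys = [] from rfl]
    rw [show PySem.Set.update ([] : PySem.Set String) (L.map Prod.fst)
        = PySem.Set.ofList (L.map Prod.fst) from rfl]
    rw [hL, List.map_append, PySem.Set.ofList_append, PySem.Set.update_eq_append_filter]
    rw [PySem.Set.ofList_eq_self_of_nodup _ h1, PySem.Set.ofList_eq_self_of_nodup _ h2]
  have hval : ∀ k, merged.getD k [] = (L.filter (fun p => p.1 == k)).map (fun p => p.2) := by
    intro k
    rw [hm, PySem.Dict.getD_foldl_modify_append L PySem.Dict.empty k]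
    rw [show (PySem.Dict.empty : PySem.Dict String (List Int)).getD k [] = [] from rfl,
      List.nil_append]
  rw [PySem.Dict.items_eq_map_keys merged hnd [], List.filter_map]
  have hsplit : ∀ k, merged.getD k []
      = (if (PySem.Dict.mk d1).contains k then [(PySem.Dict.mk d1).getD k 0] else [])
        ++ (if (PySem.Dict.mk d2).contains k then [(PySem.Dict.mk d2).getD k 0] else []) := by
    intro k
    rw [hval k, hL, List.filter_append, List.map_append, pv_filter_key d1 k h1,
      pv_filter_key d2 k h2]
  -- the size-2 test is exactly "key in both dicts"
  have htest : ∀ k, (((fun p : String × List Int => p.2.length == 2) ∘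
        (fun k => (k, merged.getD k []))) k)
      = ((PySem.Dict.mk d1).contains k && (PySem.Dict.mk d2).contains k) := by
    intro k
    simp only [Function.comp_apply]
    rw [hsplit k]
    cases (PySem.Dict.mk d1).contains k <;> cases (PySem.Dict.mk d2).contains k <;> simp
  rw [List.filter_congr (fun k _ => htest k), hkeys, List.filter_append]
  have hfil1 : (d1.map Prod.fst).filter
      (fun k => (PySem.Dict.mk d1).contains k && (PySem.Dict.mk d2).contains k)
      = (d1.map Prod.fst).filter (fun k => (PySem.Dict.mk d2).contains k) := by
    apply List.filter_congr
    intro k hk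
    rw [pv_contains_of_mem d1 k hk, Bool.true_and]
  have hfil2 : ((d2.map Prod.fst).filter
        (fun y => !(PySem.Set.ofList (d1.map Prod.fst)).contains y)).filter
      (fun k => (PySem.Dict.mk d1).contains k && (PySem.Dict.mk d2).contains k) = [] := by
    rw [List.filter_eq_nil_iff]
    intro k hk
    have hk1 : ¬ k ∈ d1.map Prod.fst := by
      have := (List.mem_filter.mp hk).2
      rw [PySem.Set.contains_eq_listContains] at this
      simp only [Bool.not_eq_eq_eq_not, Bool.not_true] at this
      rw [PySem.Set.ofList_eq_self_of_nodup _ h1] at this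
      intro hmem
      rw [List.contains_eq_mem, decide_eq_false_iff_not] at this
      exact this hmem
    rw [pv_not_contains_of_not_mem d1 k hk1, Bool.false_and]
    simp
  rw [hfil1, hfil2, List.append_nil]
  apply List.map_congr_left
  intro k hk
  have hk1 : (PySem.Dict.mk d1).contains k = true :=
    pv_contains_of_mem d1 k (List.mem_of_mem_filter hk)
  have hk2 : (PySem.Dict.mk d2).contains k = true := (List.mem_filter.mp hk).2
  rw [hsplit k, hk1, hk2]
  rfl

-- ===== VERDICT (by name: the statement is the Claim_ definition above) =====
theorem sameKeys_spec : Claim_equal_sameKeys := by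
  intro d1 d2 _ hPre
  obtain ⟨h1, h2⟩ := hPre
  unfold Spec_sameKeys sameKeys
  rw [pv_B_eq d1 d2 h1 h2]
  by_cases hd1 : d1 = []
  · subst hd1; simp
  · by_cases hd2 : d2 = []
    · subst hd2
      rw [if_pos (by simp)]
      have : ∀ k : String, (PySem.Dict.mk ([] : List (String × Int))).contains k = false := by
        intro k; rw [PySem.Dict.contains_mk]; rfl
      simp [this]
    · rw [if_neg (by simp [List.isEmpty_iff, hd1, hd2])]
      rw [show (fun (acc : PySem.Dict String (List Int)) (p : String × Int) =>
            if (PySem.Dict.mk d2).contains p.1 then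
              acc.insert p.1 [(PySem.Dict.mk d1).getD p.1 0, (PySem.Dict.mk d2).getD p.1 0]
            else acc)
          = (fun (acc : PySem.Dict String (List Int)) (p : String × Int) =>
            if (PySem.Dict.mk d2).contains p.1 then
              acc.insert p.1 (pvVal d1 d2 p.1)
            else acc) from rfl]
      rw [pv_fold_items d1 d2 d1 PySem.Dict.empty (by simp)
        (by intro q hq
            simp [show (PySem.Dict.empty : PySem.Dict String (List Int)).items = [] from rfl] at hq)]
      simp only [PySem.Dict.contains_empty, Bool.not_false, Bool.and_true]
      rw [show PySem.List.dedup (d1.map Prod.fst) = PySem.Set.ofList (d1.map Prod.fst) from rfl,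
        PySem.Set.ofList_eq_self_of_nodup _ h1,
        show (PySem.Dict.empty : PySem.Dict String (List Int)).items = [] from rfl,
        List.nil_append]
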